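-- pv_equiv track=rewrite | github.com/shan2312/DSA-Python-Solutions | Binary_Search/max_profit_from_job.py | get_prefix_max_profit
-- ===== SOURCE A (Python) =====
-- def get_prefix_max_profit(difficulty, profit):
--     job_details = []
--     for d, p in sorted(zip(difficulty, profit), key = lambda x: x[0]):
--         if len(job_details) == 0:
--             job_details.append((d, p))
--             continue
--         max_till_now = job_details[-1][1]
--         job_details.append((d, max(max_till_now, p)))
--     return job_details
-- ===== SOURCE B (Python) =====
-- def get_prefix_max_profit(difficulty, profit):
--     pairs = sorted(zip(difficulty, profit), key=lambda x: x[0])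
--
--     def solve(seg):
--         # divide and conquer: prefix maxima of each half, then lift the
--         # right half by the left half's total max (its last prefix max)
--         if len(seg) <= 1:
--             return list(seg)
--         mid = len(seg) // 2
--         left = solve(seg[:mid])
--         right = solve(seg[mid:])
--         carry = left[-1][1]
--         return left + [(d, p if p > carry else carry) for d, p in right]
--
--     return solve(pairs)
-- ===== Notes on version B (the rewrite author's own statement) =====
-- stated objective: alternative
-- what changed: Replaces A's single left-to-right append loop carrying a running maximum with a divide-and-conquer recursion: the sorted pairs are split in half, each half's prefix maxima are computed recursively, and the right half is lifted by the left half's total maximum before concatenation.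
import Mathlib
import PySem

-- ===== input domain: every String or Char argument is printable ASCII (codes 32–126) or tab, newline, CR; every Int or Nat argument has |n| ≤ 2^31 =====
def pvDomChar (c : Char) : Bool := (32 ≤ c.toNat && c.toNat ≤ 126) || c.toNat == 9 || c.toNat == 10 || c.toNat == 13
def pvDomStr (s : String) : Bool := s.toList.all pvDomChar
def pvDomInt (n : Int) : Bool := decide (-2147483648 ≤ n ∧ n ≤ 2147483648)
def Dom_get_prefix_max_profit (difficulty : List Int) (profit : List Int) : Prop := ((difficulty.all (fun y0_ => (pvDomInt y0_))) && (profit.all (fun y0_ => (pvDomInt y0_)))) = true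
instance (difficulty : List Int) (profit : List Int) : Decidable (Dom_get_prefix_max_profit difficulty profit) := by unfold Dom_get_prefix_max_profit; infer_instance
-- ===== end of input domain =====

-- B computes the prefix maxima of the sorted pairs by divide and conquer (solve each half,
-- then lift the right half by the left half's total maximum) instead of A's single
-- left-to-right append loop carrying a running maximum; alternative algorithm, same cost.

-- ===== PORT A =====
-- the body of A's for-loop: append (d,p) if empty, else append (d, max(last profit, p))
def aStep (acc : List (Int × Int)) (dp : Int × Int) : List (Int × Int) :=
  if acc.length == 0 then acc ++ [dp]
  else acc ++ [(dp.1, max (((PySem.List.pyGet? acc (-1)).getD (0, 0)).2) dp.2)]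

def get_prefix_max_profit (difficulty : List Int) (profit : List Int) : List (Int × Int) :=
  (PySem.List.sorted (difficulty.zip profit) (fun x => x.1)).foldl aStep []

-- ===== PORT B =====
-- Source B's recursive solve: seg[:mid] / seg[mid:] are PySem slices, left[-1][1] is pyGet? (-1)
-- (left is never empty when it is read, so the getD default is never used)
def bCombine (left right : List (Int × Int)) : List (Int × Int) :=
  let carry := ((PySem.List.pyGet? left (-1)).getD (0, 0)).2
  left ++ right.map (fun dp => (dp.1, if dp.2 > carry then dp.2 else carry))

def bSolve (seg : List (Int × Int)) : List (Int × Int) :=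
  if h : seg.length ≤ 1 then seg
  else
    bCombine (bSolve (PySem.List.slice seg none (some ((seg.length / 2 : Nat) : Int))))
             (bSolve (PySem.List.slice seg (some ((seg.length / 2 : Nat) : Int)) none))
  termination_by seg.length
  decreasing_by
  · rw [PySem.List.slice_to_natCast]; simp; omega
  · rw [PySem.List.slice_from_natCast]; simp; omega

def get_prefix_max_profit_alt (difficulty : List Int) (profit : List Int) : List (Int × Int) :=
  bSolve (PySem.List.sorted (difficulty.zip profit) (fun x => x.1))

-- ===== PRECONDITION & SPEC =====
def Spec_get_prefix_max_profit (difficulty : List Int) (profit : List Int) (out : List (Int × Int)) : Prop := out = get_prefix_max_profit_alt difficulty profit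
instance (difficulty : List Int) (profit : List Int) (out : List (Int × Int)) : Decidable (Spec_get_prefix_max_profit difficulty profit out) := by unfold Spec_get_prefix_max_profit; infer_instance

-- ===== CLAIM (what is proved, stated in full; the proofs are below) =====
def Claim_equal_get_prefix_max_profit : Prop := ∀ (difficulty : List Int) (profit : List Int), Dom_get_prefix_max_profit difficulty profit → Spec_get_prefix_max_profit difficulty profit (get_prefix_max_profit difficulty profit)

-- ===== LEMMAS AND PROOFS =====

-- prefix maxima of the pairs, carrying the running max m
def zipAcc (m : Int) : List (Int × Int) → List (Int × Int)
  | [] => []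
  | dp :: t => (dp.1, max m dp.2) :: zipAcc (max m dp.2) t

-- the canonical prefix-max result both programs are reduced to
def pm : List (Int × Int) → List (Int × Int)
  | [] => []
  | x :: t => x :: zipAcc x.2 t

-- the running max after consuming t, starting from m
def carryOf (m : Int) : List (Int × Int) → Int
  | [] => m
  | dp :: t => carryOf (max m dp.2) t

-- ---- A side ----
lemma foldlA (t : List (Int × Int)) : ∀ (pre : List (Int × Int)) (x : Int × Int),
    List.foldl aStep (pre ++ [x]) t = pre ++ x :: zipAcc x.2 t := by
  induction t with
  | nil => intro pre x; simp [zipAcc]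
  | cons dp t ih =>
    intro pre x
    have hstep : aStep (pre ++ [x]) dp = (pre ++ [x]) ++ [(dp.1, max x.2 dp.2)] := by
      simp [aStep, PySem.List.pyGet?_neg_one_append_singleton]
    simp only [List.foldl_cons, hstep]
    rw [ih (pre ++ [x]) (dp.1, max x.2 dp.2)]
    simp [zipAcc]

lemma foldlA_pm (seg : List (Int × Int)) : List.foldl aStep [] seg = pm seg := by
  cases seg with
  | nil => rfl
  | cons x t =>
    have h0 : aStep [] x = [x] := by simp [aStep]
    have h1 := foldlA t [] x
    simp only [List.nil_append] at h1
    simp only [List.foldl_cons, h0, h1, pm]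

-- ---- B side ----
lemma zipAcc_append (l : List (Int × Int)) : ∀ (m : Int) (r : List (Int × Int)),
    zipAcc m (l ++ r) = zipAcc m l ++ zipAcc (carryOf m l) r := by
  induction l with
  | nil => intro m r; simp [zipAcc, carryOf]
  | cons dp t ih => intro m r; simp [zipAcc, carryOf, ih]

lemma ite_max (c p : Int) : (if p > c then p else c) = max c p := by
  simp only [max_def]
  split_ifs <;> omega

lemma map_lift_zipAcc (r : List (Int × Int)) : ∀ (c m : Int),
    (zipAcc m r).map (fun dp => (dp.1, max c dp.2))
      = zipAcc (max c m) r := by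
  induction r with
  | nil => intro c m; rfl
  | cons dp t ih =>
    intro c m
    simp [zipAcc, ih, max_assoc]

lemma map_lift_pm (r : List (Int × Int)) (hr : r ≠ []) (c : Int) :
    (pm r).map (fun dp => (dp.1, max c dp.2)) = zipAcc c r := by
  cases r with
  | nil => exact absurd rfl hr
  | cons x t =>
    simp [pm, zipAcc, map_lift_zipAcc]

lemma pm_append (x : Int × Int) (t r : List (Int × Int)) :
    pm ((x :: t) ++ r) = pm (x :: t) ++ zipAcc (carryOf x.2 t) r := by
  simp only [List.cons_append, pm, zipAcc_append]

lemma last_pm (t : List (Int × Int)) : ∀ (m : Int) (a : Int × Int), a.2 = m →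
    (((a :: zipAcc m t).getLast?).getD (0, 0)).2 = carryOf m t := by
  induction t with
  | nil => intro m a ha; simp [zipAcc, carryOf, ha]
  | cons dp t ih =>
    intro m a _
    have := ih (max m dp.2) (dp.1, max m dp.2) rfl
    simpa [zipAcc, carryOf, List.getLast?_cons_cons] using this

lemma bSolve_pm : ∀ (seg : List (Int × Int)), bSolve seg = pm seg := by
  intro seg
  induction hn : seg.length using Nat.strong_induction_on generalizing seg with
  | _ n ih =>
  rw [bSolve]
  by_cases h : seg.length ≤ 1
  · rw [dif_pos h]
    cases seg with
    | nil => rfl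
    | cons x t =>
      cases t with
      | nil => rfl
      | cons y u => simp at h
  · rw [dif_neg h]
    have h2 : 2 ≤ seg.length := by omega
    have hm1 : 1 ≤ seg.length / 2 := by omega
    have hm2 : seg.length / 2 < seg.length := by omega
    set mid := seg.length / 2 with hmid
    rw [PySem.List.slice_to_natCast, PySem.List.slice_from_natCast]
    have hltake : (seg.take mid).length = mid := by simp; omega
    have hldrop : (seg.drop mid).length = seg.length - mid := by simp
    rw [ih (seg.take mid).length (by omega) _ rfl,
        ih (seg.drop mid).length (by omega) _ rfl]
    obtain ⟨x, t, hxt⟩ : ∃ x t, seg.take mid = x :: t := by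
      cases hc : seg.take mid with
      | nil => rw [hc] at hltake; simp at hltake; omega
      | cons x t => exact ⟨x, t, rfl⟩
    have hdropne : seg.drop mid ≠ [] := by
      intro hc; rw [hc] at hldrop; simp at hldrop; omega
    rw [hxt]
    simp only [bCombine, ite_max]
    rw [show PySem.List.pyGet? (pm (x :: t)) (-1) = (pm (x :: t)).getLast? from
      PySem.List.pyGet?_neg_one _]
    have hc : (((pm (x :: t)).getLast?).getD (0, 0)).2 = carryOf x.2 t := by
      simp only [pm]
      exact last_pm t x.2 x rfl
    rw [hc, map_lift_pm _ hdropne]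
    rw [← pm_append x t (seg.drop mid), ← hxt, List.take_append_drop]

-- ===== VERDICT (by name: the statement is the Claim_ definition above) =====
theorem get_prefix_max_profit_spec : Claim_equal_get_prefix_max_profit := by
  intro difficulty profit _
  unfold Spec_get_prefix_max_profit get_prefix_max_profit get_prefix_max_profit_alt
  rw [foldlA_pm, bSolve_pm]
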